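-- pv_equiv track=rewrite | github.com/Jiuxiao-yunwai/RL-kaiwu | exp2-back-to-the-realm/agent_target_dqn_01/workflow/train_workflow.py | get_curriculum_config
-- ===== SOURCE A (Python) =====
-- import copy
--
-- CURRICULUM = [
--     # (起始epoch, 宝箱数量, max_step)
--     (0,     5,  600),     # 阶段1: 先学会导航+拾取少量宝箱，短局快速迭代
--     (1500,  8,  800),     # 阶段2: 中等数量宝箱
--     (4000,  11, 900),     # 阶段3: 大部分宝箱
--     (7000,  13, 1000),    # 阶段4: 全量宝箱，与评估对齐
-- ]
--
-- def get_curriculum_config(epoch, base_conf):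
--     """根据当前epoch返回课程学习配置"""
--     treasure_count = CURRICULUM[0][1]
--     max_step = CURRICULUM[0][2]
--     for start_epoch, tc, ms in CURRICULUM:
--         if epoch >= start_epoch:
--             treasure_count = tc
--             max_step = ms
--
--     conf = copy.deepcopy(base_conf)
--     conf["env_conf"]["treasure_count"] = treasure_count
--     conf["env_conf"]["max_step"] = max_step
--     return conf, treasure_count, max_step
-- ===== SOURCE B (Python) =====
-- import copy
--
-- CURRICULUM = [
--     # (起始epoch, 宝箱数量, max_step)
--     (0,     5,  600),
--     (1500,  8,  800),
--     (4000,  11, 900),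
--     (7000,  13, 1000),
-- ]
--
-- def get_curriculum_config(epoch, base_conf):
--     """根据当前epoch返回课程学习配置"""
--     # binary search for the rightmost tier whose start_epoch <= epoch,
--     # clamped to the first tier for epochs before every start.
--     starts = [s for s, _, _ in CURRICULUM]
--     lo, hi = 0, len(starts)
--     while lo < hi:
--         mid = (lo + hi) // 2
--         if starts[mid] <= epoch:
--             lo = mid + 1
--         else:
--             hi = mid
--     idx = max(lo - 1, 0)
--     _, treasure_count, max_step = CURRICULUM[idx]
--
--     conf = copy.deepcopy(base_conf)
--     conf["env_conf"]["treasure_count"] = treasure_count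
--     conf["env_conf"]["max_step"] = max_step
--     return conf, treasure_count, max_step
-- ===== Notes on version B (the rewrite author's own statement) =====
-- stated objective: alternative
-- what changed: Replaces A's linear last-match scan over CURRICULUM with a hand-rolled binary search over the start-epoch thresholds (clamped to 0 for epochs before the first tier); the deepcopy and env_conf updates are unchanged.
import Mathlib
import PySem

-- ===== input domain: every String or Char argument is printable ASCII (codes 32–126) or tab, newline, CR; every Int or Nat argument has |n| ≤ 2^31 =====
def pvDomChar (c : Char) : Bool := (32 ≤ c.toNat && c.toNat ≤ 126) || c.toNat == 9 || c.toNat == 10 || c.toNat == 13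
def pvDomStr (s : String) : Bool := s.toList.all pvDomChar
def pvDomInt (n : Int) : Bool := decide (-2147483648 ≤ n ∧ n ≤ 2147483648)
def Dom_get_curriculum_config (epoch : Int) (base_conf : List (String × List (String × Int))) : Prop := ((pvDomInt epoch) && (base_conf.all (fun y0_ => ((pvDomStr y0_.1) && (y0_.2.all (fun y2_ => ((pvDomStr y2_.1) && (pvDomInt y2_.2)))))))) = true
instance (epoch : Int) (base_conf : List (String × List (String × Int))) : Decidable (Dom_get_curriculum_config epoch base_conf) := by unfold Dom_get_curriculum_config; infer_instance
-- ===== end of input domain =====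

-- B replaces A's linear last-match scan of CURRICULUM with a clamped binary search over the
-- start-epoch thresholds (objective: alternative); the deepcopy and env_conf updates are unchanged.

-- ===== PORT A =====
def pvCurriculum : List (Int × Int × Int) :=
  [(0, 5, 600), (1500, 8, 800), (4000, 11, 900), (7000, 13, 1000)]

-- shared by both ports: conf["env_conf"]["treasure_count"]=tc; conf["env_conf"]["max_step"]=ms
-- (deepcopy is the identity on immutable values; in-place mutation of the inner dict keeps positions,
-- matched by PySem.Dict.insert's overwrite-in-place semantics)
def pvSetEnv (base_conf : List (String × List (String × Int))) (tc ms : Int) :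
    List (String × List (String × Int)) :=
  let d := PySem.Dict.mk base_conf
  let inner := PySem.Dict.mk (d.getD "env_conf" [])
  let inner := (inner.insert "treasure_count" tc).insert "max_step" ms
  (d.insert "env_conf" inner.items).items

def get_curriculum_config (epoch : Int) (base_conf : List (String × List (String × Int))) : (List (String × List (String × Int))) × Int × Int :=
  let init : Int × Int := ((pvCurriculum.headD (0, 0, 0)).2.1, (pvCurriculum.headD (0, 0, 0)).2.2)
  let p := pvCurriculum.foldl (fun (acc : Int × Int) t => if epoch ≥ t.1 then (t.2.1, t.2.2) else acc) init
  (pvSetEnv base_conf p.1 p.2, p.1, p.2)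

-- ===== PORT B =====
-- the while lo < hi loop, as fuel recursion (fuel = hi - lo suffices)
def pvBSearch (epoch : Int) (starts : List Int) : Nat → Nat → Nat → Nat
  | 0, lo, _ => lo
  | fuel + 1, lo, hi =>
    if lo < hi then
      let mid := (lo + hi) / 2
      if starts.getD mid 0 ≤ epoch then pvBSearch epoch starts fuel (mid + 1) hi
      else pvBSearch epoch starts fuel lo mid
    else lo

def get_curriculum_config_alt (epoch : Int) (base_conf : List (String × List (String × Int))) : (List (String × List (String × Int))) × Int × Int :=
  let starts := pvCurriculum.map (·.1)
  let lo := pvBSearch epoch starts starts.length 0 starts.length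
  let idx := lo - 1   -- Nat subtraction = Python's max(lo - 1, 0) for lo ≥ 0
  let t := pvCurriculum.getD idx (0, 0, 0)
  (pvSetEnv base_conf t.2.1 t.2.2, t.2.1, t.2.2)

-- ===== PRECONDITION & SPEC =====
-- Pre_ excludes exactly the inputs where Python A raises KeyError: base_conf without an "env_conf" key.
def Pre_get_curriculum_config (epoch : Int) (base_conf : List (String × List (String × Int))) : Prop :=
  "env_conf" ∈ base_conf.map Prod.fst
instance (epoch : Int) (base_conf : List (String × List (String × Int))) : Decidable (Pre_get_curriculum_config epoch base_conf) := by unfold Pre_get_curriculum_config; infer_instance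
def pvWitness_get_curriculum_config : Int × (List (String × List (String × Int))) :=
  (1500, [("env_conf", [("treasure_count", 0), ("foo", 7)])])

def Spec_get_curriculum_config (epoch : Int) (base_conf : List (String × List (String × Int))) (out : (List (String × List (String × Int))) × Int × Int) : Prop := out = get_curriculum_config_alt epoch base_conf
instance (epoch : Int) (base_conf : List (String × List (String × Int))) (out : (List (String × List (String × Int))) × Int × Int) : Decidable (Spec_get_curriculum_config epoch base_conf out) := by unfold Spec_get_curriculum_config; infer_instance

-- ===== CLAIM (what is proved, stated in full; the proofs are below) =====
def Claim_equal_get_curriculum_config : Prop := ∀ (epoch : Int) (base_conf : List (String × List (String × Int))), Dom_get_curriculum_config epoch base_conf → Pre_get_curriculum_config epoch base_conf → Spec_get_curriculum_config epoch base_conf (get_curriculum_config epoch base_conf)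

-- ===== LEMMAS AND PROOFS =====
-- both selectors pick the same (treasure_count, max_step) pair, by case split on the thresholds
lemma pv_sel_eq (epoch : Int) :
    (pvCurriculum.foldl (fun (acc : Int × Int) t => if epoch ≥ t.1 then (t.2.1, t.2.2) else acc)
      ((pvCurriculum.headD (0, 0, 0)).2.1, (pvCurriculum.headD (0, 0, 0)).2.2))
    = (let starts := pvCurriculum.map (·.1)
       let lo := pvBSearch epoch starts starts.length 0 starts.length
       ((pvCurriculum.getD (lo - 1) (0, 0, 0)).2.1, (pvCurriculum.getD (lo - 1) (0, 0, 0)).2.2)) := by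
  by_cases h1 : (1500 : Int) ≤ epoch <;> by_cases h2 : (4000 : Int) ≤ epoch <;>
    by_cases h3 : (7000 : Int) ≤ epoch <;> by_cases h0 : (0 : Int) ≤ epoch <;>
    simp [pvCurriculum, pvBSearch, List.foldl, ge_iff_le, h0, h1, h2, h3] <;> omega

-- ===== VERDICT (by name: the statement is the Claim_ definition above) =====
theorem get_curriculum_config_spec : Claim_equal_get_curriculum_config := by
  intro epoch base_conf _ _
  show _ = _
  unfold get_curriculum_config get_curriculum_config_alt
  have h := pv_sel_eq epoch
  simp only at h ⊢
  rw [h]
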